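-- pv_equiv track=rewrite | github.com/davidolima/external-sorting | methods/cascade.py | _calculate_ideal_previous_line
-- ===== SOURCE A (Python) =====
-- from typing import List
--
-- def _calculate_ideal_previous_line(line: List[int]) -> List[int]:
--     r = [0]*len(line)
--     curr_line = line.copy()
--     # Weird way of doing it, but it moves the empty file around
--     valid_idxs = list(range(len(line)))
--     valid_idxs.remove(line.index(max(line)))
--     for i in valid_idxs:
--         curr_line.remove(min(curr_line))
--         r[i] = sum(curr_line)
--     return r
-- ===== SOURCE B (Python) =====
-- def _calculate_ideal_previous_line(line):
--     n = len(line)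
--     r = [0] * n
--     mi = line.index(max(line))
--     rem = sum(line)
--     s = sorted(line)
--     j = 0
--     for i in range(n):
--         if i == mi:
--             continue
--         rem -= s[j]
--         j += 1
--         r[i] = rem
--     return r
-- ===== Notes on version B (the rewrite author's own statement) =====
-- stated objective: faster
-- what changed: Replaces A's loop that repeatedly removes the minimum and re-sums the whole remaining list (quadratic) by sorting once and keeping a running remainder (total minus prefix of the sorted list) assigned to the non-max indices in order.
import Mathlib
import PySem

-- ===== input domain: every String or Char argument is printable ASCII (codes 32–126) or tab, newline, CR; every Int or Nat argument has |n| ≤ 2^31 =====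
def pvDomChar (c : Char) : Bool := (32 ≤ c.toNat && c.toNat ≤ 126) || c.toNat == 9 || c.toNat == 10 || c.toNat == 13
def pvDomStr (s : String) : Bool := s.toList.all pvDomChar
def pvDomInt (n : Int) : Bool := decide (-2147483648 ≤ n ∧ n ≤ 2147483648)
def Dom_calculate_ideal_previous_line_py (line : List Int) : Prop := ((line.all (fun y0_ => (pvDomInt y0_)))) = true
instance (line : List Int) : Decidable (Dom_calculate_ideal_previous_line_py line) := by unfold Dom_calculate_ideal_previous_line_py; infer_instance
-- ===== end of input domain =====

-- B replaces A's quadratic remove-min/re-sum loop by one sort with a running suffix sum (measured asymptotically faster).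

-- ===== PORT A =====
-- loop body of 'for i in valid_idxs: curr_line.remove(min(curr_line)); r[i] = sum(curr_line)'
def stepA (st : List Int × List Int) (i : Int) : List Int × List Int :=
  match PySem.List.min? st.2 (fun x => x) with
  | none => st                                   -- min([]) raises; unreachable under Pre_
  | some mn =>
    let cur' := (PySem.List.remove? st.2 mn).getD st.2
    (PySem.List.pySetD st.1 i cur'.sum, cur')

def calculate_ideal_previous_line_py (line : List Int) : List Int :=
  let r := List.replicate line.length (0 : Int)
  let curr_line := line
  let valid_idxs := PySem.List.pyRange 0 line.length 1
  match PySem.List.max? line (fun x => x) with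
  | none => []                                    -- max([]) raises; excluded by Pre_
  | some mx =>
    match PySem.List.index? line mx with
    | none => []                                  -- unreachable (mx ∈ line)
    | some mi =>
      match PySem.List.remove? valid_idxs (mi : Int) with
      | none => []                                -- unreachable (mi ∈ range)
      | some valid => (valid.foldl stepA (r, curr_line)).1

-- ===== PORT B =====
-- loop body of B: skip mi, otherwise consume next sorted element and record the running remainder
def stepB (s : List Int) (mi : Int) (st : List Int × Int × Nat) (i : Int) : List Int × Int × Nat :=
  if i = mi then st
  else
    let rem := st.2.1 - PySem.List.pyGetD s (st.2.2 : Int) 0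
    (PySem.List.pySetD st.1 i rem, rem, st.2.2 + 1)

def calculate_ideal_previous_line_py_alt (line : List Int) : List Int :=
  let n := line.length
  let r := List.replicate n (0 : Int)
  match PySem.List.max? line (fun x => x) with
  | none => []                                    -- line.index(max(line)) raises on []; excluded by Pre_
  | some mx =>
    let mi : Int := ((PySem.List.index? line mx).getD 0 : Nat)
    let s := PySem.List.sorted line (fun x => x)
    ((PySem.List.pyRange 0 n 1).foldl (stepB s mi) (r, line.sum, 0)).1

-- ===== PRECONDITION & SPEC =====
-- A raises ValueError on the empty list (max of empty sequence); B raises there too.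
def Pre_calculate_ideal_previous_line_py (line : List Int) : Prop := line ≠ []
instance (line : List Int) : Decidable (Pre_calculate_ideal_previous_line_py line) := by unfold Pre_calculate_ideal_previous_line_py; infer_instance
def pvWitness_calculate_ideal_previous_line_py : List Int := [3, 1, 2]

def Spec_calculate_ideal_previous_line_py (line : List Int) (out : List Int) : Prop := out = calculate_ideal_previous_line_py_alt line
instance (line : List Int) (out : List Int) : Decidable (Spec_calculate_ideal_previous_line_py line out) := by unfold Spec_calculate_ideal_previous_line_py; infer_instance

-- ===== CLAIM (what is proved, stated in full; the proofs are below) =====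
def Claim_equal_calculate_ideal_previous_line_py : Prop := ∀ (line : List Int), Dom_calculate_ideal_previous_line_py line → Pre_calculate_ideal_previous_line_py line → Spec_calculate_ideal_previous_line_py line (calculate_ideal_previous_line_py line)

-- ===== LEMMAS AND PROOFS =====

-- Joint loop invariant: A's current multiset is a permutation of the suffix of the sorted
-- list s from position j, and B's running remainder is that suffix's sum.
lemma fold_agree (s : List Int) (hs : s.Pairwise (· ≤ ·)) :
    ∀ (idxs : List Int) (j : Nat) (r cur : List Int),
      cur.Perm (s.drop j) → idxs.length + j ≤ s.length →
      (idxs.foldl stepA (r, cur)).1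
        = (idxs.foldl (fun (st : List Int × Int × Nat) i =>
              let rem := st.2.1 - PySem.List.pyGetD s (st.2.2 : Int) 0
              (PySem.List.pySetD st.1 i rem, rem, st.2.2 + 1))
            (r, (s.drop j).sum, j)).1 := by
  intro idxs
  induction idxs with
  | nil => intro j r cur _ _; rfl
  | cons i rest ih =>
    intro j r cur hperm hlen
    have hj : j < s.length := by simp at hlen; omega
    have hdrop : s.drop j = s[j] :: s.drop (j + 1) := List.drop_eq_getElem_cons hj
    have hcurne : cur ≠ [] := by
      intro h; rw [h] at hperm
      have := hperm.length_eq
      rw [hdrop] at this; simp at this; omega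
    obtain ⟨m, hm⟩ : ∃ m, PySem.List.min? cur (fun x => x) = some m := by
      cases hmin : PySem.List.min? cur (fun x => x) with
      | none => exact absurd ((PySem.List.min?_eq_none_iff cur _).mp hmin) hcurne
      | some m => exact ⟨m, rfl⟩
    have hmmem : m ∈ cur := PySem.List.min?_mem hm
    have hxmem : s[j] ∈ cur := hperm.mem_iff.mpr (by rw [hdrop]; exact List.mem_cons_self)
    have hmx : m = s[j] := by
      have h1 : m ≤ s[j] := PySem.List.min?_isMin hm _ hxmem
      have hpd : (s.drop j).Pairwise (· ≤ ·) := hs.drop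
      rw [hdrop] at hpd
      have hmem' : m ∈ s[j] :: s.drop (j + 1) := by
        rw [← hdrop]; exact hperm.mem_iff.mp hmmem
      rcases List.mem_cons.mp hmem' with h | h
      · exact h
      · exact le_antisymm h1 (List.rel_of_pairwise_cons hpd h)
    -- the erased list is a permutation of the next suffix
    have hrm : PySem.List.remove? cur m = some (cur.erase m) :=
      PySem.List.remove?_eq_some_erase cur m hmmem
    have hperm' : (cur.erase m).Perm (s.drop (j + 1)) := by
      rw [hmx]
      have h2 := hperm.erase s[j]
      rw [hdrop, List.erase_cons_head] at h2
      exact h2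
    have hsum' : (cur.erase m).sum = (s.drop (j + 1)).sum := hperm'.sum_eq
    have hget : PySem.List.pyGetD s ((j : Nat) : Int) 0 = s[j] := by
      rw [PySem.List.pyGetD_natCast]; exact List.getD_eq_getElem s 0 hj
    have hsumdrop : (s.drop j).sum = s[j] + (s.drop (j + 1)).sum := by
      conv_lhs => rw [hdrop]
      rw [List.sum_cons]
    simp only [List.foldl_cons]
    rw [show stepA (r, cur) i
          = (PySem.List.pySetD r i ((cur.erase m).sum), cur.erase m) by
        simp [stepA, hm, hrm]]
    rw [hsum']
    have hrem : (s.drop j).sum - PySem.List.pyGetD s ((j : Nat) : Int) 0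
        = (s.drop (j + 1)).sum := by rw [hget, hsumdrop]; ring
    rw [hrem]
    exact ih (j + 1) (PySem.List.pySetD r i ((s.drop (j + 1)).sum)) (cur.erase m)
      hperm' (by simp at hlen ⊢; omega)

-- ===== VERDICT (by name: the statement is the Claim_ definition above) =====
theorem calculate_ideal_previous_line_py_spec : Claim_equal_calculate_ideal_previous_line_py := by
  intro line _hdom hpre
  unfold Spec_calculate_ideal_previous_line_py
  obtain ⟨mx, hmax⟩ : ∃ mx, PySem.List.max? line (fun x => x) = some mx := by
    cases h : PySem.List.max? line (fun x => x) with
    | none => exact absurd ((PySem.List.max?_eq_none_iff line _).mp h) hpre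
    | some mx => exact ⟨mx, rfl⟩
  have hmxmem : mx ∈ line := PySem.List.max?_mem hmax
  obtain ⟨mi, hidx⟩ : ∃ mi, PySem.List.index? line mx = some mi := by
    cases h : PySem.List.index? line mx with
    | none => rw [PySem.List.index?_eq_none_iff] at h; exact absurd hmxmem h
    | some mi => exact ⟨mi, rfl⟩
  obtain ⟨hmilt, -, -⟩ := PySem.List.getElem_of_index?_eq_some hidx
  have hmirange : (mi : Int) ∈ PySem.List.pyRange 0 line.length 1 := by
    rw [PySem.List.mem_pyRange_one]
    exact ⟨by exact_mod_cast Nat.zero_le mi, by exact_mod_cast hmilt⟩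
  have hrm := PySem.List.remove?_eq_some_erase _ _ hmirange
  have hsp : (PySem.List.sorted line (fun x => x)).Pairwise (· ≤ ·) :=
    PySem.List.sorted_pairwise line _
  have hperm0 : line.Perm ((PySem.List.sorted line (fun x => x)).drop 0) := by
    rw [List.drop_zero]; exact (PySem.List.sorted_perm line _ _).symm
  have hsum0 : ((PySem.List.sorted line (fun x => x)).drop 0).sum = line.sum := by
    rw [List.drop_zero]; exact (PySem.List.sorted_perm line _ _).sum_eq
  have hstepB : stepB (PySem.List.sorted line (fun x => x)) (mi : Int)
      = fun (st : List Int × Int × Nat) (i : Int) =>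
          if (i != (mi : Int)) = true then
            (let rem := st.2.1 - PySem.List.pyGetD (PySem.List.sorted line (fun x => x)) (st.2.2 : Int) 0;
             (PySem.List.pySetD st.1 i rem, rem, st.2.2 + 1))
          else st := by
    funext st i
    simp only [stepB]
    by_cases h : i = (mi : Int) <;> simp [h]
  have hlen : ((PySem.List.pyRange 0 (line.length : Int) 1).erase (mi : Int)).length + 0
      ≤ (PySem.List.sorted line (fun x => x)).length := by
    rw [List.length_erase_of_mem hmirange]
    rw [PySem.List.length_pyRange_one, PySem.List.length_sorted]
    omega
  simp only [calculate_ideal_previous_line_py, calculate_ideal_previous_line_py_alt,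
    hmax, hidx, hrm, Option.getD_some]
  rw [hstepB, ← List.foldl_filter,
    ← List.Nodup.erase_eq_filter (PySem.List.nodup_pyRange_one 0 (line.length : Int)) (mi : Int)]
  have H := fold_agree (PySem.List.sorted line (fun x => x)) hsp
    ((PySem.List.pyRange 0 (line.length : Int) 1).erase (mi : Int)) 0
    (List.replicate line.length (0 : Int)) line hperm0 hlen
  rw [hsum0] at H
  exact H
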